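-- pv_equiv track=rewrite | github.com/whatrocks/solutions | advent-of-code/2021/3.py | get_next_numbers_more
-- ===== SOURCE A (Python) =====
-- def get_next_numbers_more(nums, index):
--     ones = []
--     zeroes = []
--     for n in nums:
--         if n[index] == '1':
--             ones.append(n)
--         else:
--             zeroes.append(n)
--     if len(ones) > len(zeroes):
--         return ones
--     elif len(ones) == len(zeroes):
--         return ones
--     else:
--         return zeroes
-- ===== SOURCE B (Python) =====
-- def get_next_numbers_more(nums, index):
--     s = sorted(nums, key=lambda n: n[index] != '1')
--     k = 0
--     while k < len(s) and s[k][index] == '1':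
--         k += 1
--     if 2 * k >= len(s):
--         return s[:k]
--     return s[k:]
-- ===== Notes on version B (the rewrite author's own statement) =====
-- stated objective: alternative
-- what changed: B stably sorts the list by the bit at index (ones group before zeroes group), scans for the group boundary k, and returns the winning slice s[:k] or s[k:], instead of A's one-pass partition into two lists followed by a length comparison.
import Mathlib
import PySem

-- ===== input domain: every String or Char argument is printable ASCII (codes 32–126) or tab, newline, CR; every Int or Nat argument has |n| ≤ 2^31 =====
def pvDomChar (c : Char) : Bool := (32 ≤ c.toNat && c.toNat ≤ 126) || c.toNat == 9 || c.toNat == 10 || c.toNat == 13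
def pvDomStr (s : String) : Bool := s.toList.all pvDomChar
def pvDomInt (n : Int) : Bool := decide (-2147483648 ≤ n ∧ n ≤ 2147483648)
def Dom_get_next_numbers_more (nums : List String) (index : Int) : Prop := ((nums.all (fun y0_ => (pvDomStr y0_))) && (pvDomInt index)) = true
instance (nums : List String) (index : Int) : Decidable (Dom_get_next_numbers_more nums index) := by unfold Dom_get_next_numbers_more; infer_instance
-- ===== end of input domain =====

-- B sorts the list stably by the bit at `index` (ones group first), finds the group boundary k,
-- and returns the winning slice s[:k] or s[k:], instead of A's partition-into-two-lists-and-compare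
-- (objective: alternative — a sort-then-slice strategy, O(n^2) insertion sort vs A's O(n) pass).


-- ===== PORT A =====
-- Loop appending each string to `ones` or `zeroes`, then three-way length comparison.
-- n[index] is PySem.Str.pyGet? (none = IndexError, excluded by Pre_).
def get_next_numbers_more (nums : List String) (index : Int) : List String :=
  let st := nums.foldl
    (fun (st : List String × List String) n =>
      if PySem.Str.pyGet? n index = some '1' then (st.1 ++ [n], st.2) else (st.1, st.2 ++ [n]))
    ([], [])
  if st.1.length > st.2.length then st.1
  else if st.1.length = st.2.length then st.1
  else st.2

-- ===== PORT B =====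
-- the sort key `n[index] != '1'`: Python's False/True ordered as 0/1
def pvKeyB (index : Int) (n : String) : Int :=
  if PySem.Str.pyGet? n index ≠ some '1' then 1 else 0

-- the `while k < len(s) and s[k][index] == '1': k += 1` boundary scan
def pvBoundary (index : Int) : List String → Nat
  | [] => 0
  | n :: t => if PySem.Str.pyGet? n index = some '1' then pvBoundary index t + 1 else 0

def get_next_numbers_more_alt (nums : List String) (index : Int) : List String :=
  let s := PySem.List.sorted nums (pvKeyB index)
  let k := pvBoundary index s
  -- s[:k] / s[k:] with k a Nat (PySem.List.slice_to_natCast / slice_from_natCast: take / drop)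
  if (s.length : Int) ≤ 2 * k then s.take k
  else s.drop k

-- ===== PRECONDITION & SPEC =====
-- Pre_ excludes exactly the inputs on which Python A raises IndexError (some n[index] out of range).
def Pre_get_next_numbers_more (nums : List String) (index : Int) : Prop :=
  ∀ n ∈ nums, (PySem.Str.pyGet? n index).isSome
instance (nums : List String) (index : Int) : Decidable (Pre_get_next_numbers_more nums index) := by
  unfold Pre_get_next_numbers_more; infer_instance
def pvWitness_get_next_numbers_more : List String × Int := (["10", "01", "11"], 0)

def Spec_get_next_numbers_more (nums : List String) (index : Int) (out : List String) : Prop := out = get_next_numbers_more_alt nums index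
instance (nums : List String) (index : Int) (out : List String) : Decidable (Spec_get_next_numbers_more nums index out) := by unfold Spec_get_next_numbers_more; infer_instance

-- ===== CLAIM (what is proved, stated in full; the proofs are below) =====
def Claim_equal_get_next_numbers_more : Prop := ∀ (nums : List String) (index : Int), Dom_get_next_numbers_more nums index → Pre_get_next_numbers_more nums index → Spec_get_next_numbers_more nums index (get_next_numbers_more nums index)

-- ===== LEMMAS AND PROOFS =====

-- A's accumulating loop builds exactly (filter p, filter ¬p), appended to the starting accumulators.
theorem pv_fold_partition (p : String → Prop) [DecidablePred p] (nums a b : List String) :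
    nums.foldl (fun (st : List String × List String) n =>
      if p n then (st.1 ++ [n], st.2) else (st.1, st.2 ++ [n])) (a, b)
    = (a ++ nums.filter (fun n => decide (p n)), b ++ nums.filter (fun n => !decide (p n))) := by
  induction nums generalizing a b with
  | nil => simp
  | cons x xs ih =>
    by_cases h : p x <;> simp [List.foldl_cons, h, ih]

-- inserting a 0-key element into (zeros-keyed a ++ ones-keyed b) puts it right between them
theorem pv_insertBy_mid (index : Int) (x : String) (a b : List String)
    (hx : pvKeyB index x = 0) (ha : ∀ y ∈ a, pvKeyB index y = 0) (hb : ∀ y ∈ b, pvKeyB index y = 1) :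
    PySem.List.insertBy (fun u v => decide (pvKeyB index u < pvKeyB index v)) x (a ++ b)
      = a ++ x :: b := by
  induction a with
  | nil =>
    cases b with
    | nil => rfl
    | cons y t =>
      have hy := hb y (by simp)
      simp [PySem.List.insertBy, hx, hy]
  | cons z a ih =>
    have hz := ha z (by simp)
    have h : decide (pvKeyB index x < pvKeyB index z) = false := by
      simp [hx, hz]
    simp only [List.cons_append, PySem.List.insertBy, h, Bool.false_eq_true, if_false]
    rw [ih (fun y hy => ha y (by simp [hy]))]

-- a stable sort on a 0/1 key is: the 0-keyed elements in order, then the 1-keyed ones in order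
theorem pv_sorted_binary (index : Int) (nums : List String) :
    PySem.List.sorted nums (pvKeyB index)
      = nums.filter (fun n => pvKeyB index n = 0) ++ nums.filter (fun n => ¬ pvKeyB index n = 0) := by
  rw [PySem.List.sorted_eq_foldl_insertBy]
  suffices h : ∀ (a b : List String), (∀ y ∈ a, pvKeyB index y = 0) → (∀ y ∈ b, pvKeyB index y = 1) →
      nums.foldl (fun acc x => PySem.List.insertBy (fun u v => decide (pvKeyB index u < pvKeyB index v)) x acc) (a ++ b)
      = (a ++ nums.filter (fun n => pvKeyB index n = 0)) ++ (b ++ nums.filter (fun n => ¬ pvKeyB index n = 0)) by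
    simpa using h [] [] (by simp) (by simp)
  induction nums with
  | nil => intro a b _ _; simp
  | cons x t ih =>
    intro a b ha hb
    have hx01 : pvKeyB index x = 0 ∨ pvKeyB index x = 1 := by
      unfold pvKeyB; split_ifs <;> simp
    simp only [List.foldl_cons]
    rcases hx01 with hx | hx
    · rw [pv_insertBy_mid index x a b hx ha hb]
      have hsplit : a ++ x :: b = (a ++ [x]) ++ b := by simp
      have ha' : ∀ y ∈ a ++ [x], pvKeyB index y = 0 := by
        intro y hy
        rcases List.mem_append.1 hy with h | h
        · exact ha y h
        · simp at h; subst h; exact hx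
      rw [hsplit, ih (a ++ [x]) b ha' hb]
      simp [hx]
    · have hnb : ∀ y ∈ a ++ b, decide (pvKeyB index x < pvKeyB index y) = false := by
        intro y hy
        rcases List.mem_append.1 hy with h | h
        · simp [hx, ha y h]
        · simp [hx, hb y h]
      rw [PySem.List.insertBy_of_forall_not_before _ _ _ hnb]
      have hsplit : (a ++ b) ++ [x] = a ++ (b ++ [x]) := by simp
      have hb' : ∀ y ∈ b ++ [x], pvKeyB index y = 1 := by
        intro y hy
        rcases List.mem_append.1 hy with h | h
        · exact hb y h
        · simp at h; subst h; exact hx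
      rw [hsplit, ih a (b ++ [x]) ha hb']
      simp [hx]

-- the boundary scan counts the whole ones-block when the rest starts with a non-'1' element
theorem pv_boundary_append (index : Int) (a b : List String)
    (ha : ∀ y ∈ a, PySem.Str.pyGet? y index = some '1')
    (hb : ∀ y ∈ b, ¬ PySem.Str.pyGet? y index = some '1') :
    pvBoundary index (a ++ b) = a.length := by
  induction a with
  | nil =>
    cases b with
    | nil => rfl
    | cons y t =>
      simp only [List.nil_append, pvBoundary, List.length_nil]
      rw [if_neg (hb y (by simp))]
  | cons z a ih =>
    simp only [List.cons_append, pvBoundary, List.length_cons]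
    rw [if_pos (ha z (by simp)), ih (fun y hy => ha y (by simp [hy]))]

theorem pv_key_zero_iff (index : Int) (n : String) :
    pvKeyB index n = 0 ↔ PySem.Str.pyGet? n index = some '1' := by
  unfold pvKeyB; split_ifs with h
  · exact ⟨fun h1 => absurd h1 (by norm_num), fun h1 => absurd h1 h⟩
  · push Not at h; exact ⟨fun _ => h, fun _ => rfl⟩

theorem get_next_numbers_more_eq (nums : List String) (index : Int) :
    get_next_numbers_more nums index = get_next_numbers_more_alt nums index := by
  unfold get_next_numbers_more get_next_numbers_more_alt
  rw [pv_fold_partition (fun n => PySem.Str.pyGet? n index = some '1') nums [] []]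
  have hfo : nums.filter (fun n => decide (pvKeyB index n = 0))
      = nums.filter (fun n => decide (PySem.Str.pyGet? n index = some '1')) := by
    apply List.filter_congr; intro y _
    simp only [decide_eq_decide]; exact pv_key_zero_iff index y
  have hfz : nums.filter (fun n => decide (¬ pvKeyB index n = 0))
      = nums.filter (fun n => !decide (PySem.Str.pyGet? n index = some '1')) := by
    apply List.filter_congr; intro y _
    simp only [decide_not, Bool.not_inj_iff, decide_eq_decide]
    exact pv_key_zero_iff index y
  rw [pv_sorted_binary index nums]
  simp only [hfo, hfz, List.nil_append]
  have hk : pvBoundary index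
        (nums.filter (fun n => decide (PySem.Str.pyGet? n index = some '1'))
          ++ nums.filter (fun n => !decide (PySem.Str.pyGet? n index = some '1')))
      = (nums.filter (fun n => decide (PySem.Str.pyGet? n index = some '1'))).length := by
    apply pv_boundary_append
    · intro y hy; simpa using List.of_mem_filter hy
    · intro y hy; simpa using List.of_mem_filter hy
  rw [hk, List.take_left, List.drop_left]
  simp only [List.length_append]
  split_ifs with h1 h2 h3 h4 h5 <;> first
    | rfl
    | (exfalso; omega)

-- ===== VERDICT (by name: the statement is the Claim_ definition above) =====
theorem get_next_numbers_more_spec : Claim_equal_get_next_numbers_more := by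
  intro nums index _ _
  unfold Spec_get_next_numbers_more
  exact get_next_numbers_more_eq nums index
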